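-- pv_equiv track=rewrite | github.com/Maker-H/Study-Algorithm-swea | D2/1974_sudoku.py | one_block_check_double
-- ===== SOURCE A (Python) =====
-- def one_block_check_double(sudoku, position):
--     f_idx , s_idx = position
--     one_block = []
--     for first in range(f_idx, f_idx+3):
--         for second in range(s_idx, s_idx+3):
--             one_block.append(sudoku[first][second])
--
--     block_len = len(one_block)
--     nodouble_len = len(set(one_block))
--
--     if block_len == nodouble_len:
--         return True
--     elif block_len != nodouble_len:
--         return False
-- ===== SOURCE B (Python) =====
-- def one_block_check_double(sudoku, position):
--     f_idx, s_idx = position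
--     for k in range(9):
--         vk = sudoku[f_idx + k // 3][s_idx + k % 3]
--         for l in range(k + 1, 9):
--             if vk == sudoku[f_idx + l // 3][s_idx + l % 3]:
--                 return False
--     return True
-- ===== Notes on version B (the rewrite author's own statement) =====
-- stated objective: alternative
-- what changed: B uses no set at all: it linearizes the block to indices 0..8 (row = k//3, col = k%3) and does a brute-force all-pairs comparison, returning False at the first equal pair, instead of A's collect-all-cells-then-compare len(list) vs len(set).
import Mathlib
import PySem

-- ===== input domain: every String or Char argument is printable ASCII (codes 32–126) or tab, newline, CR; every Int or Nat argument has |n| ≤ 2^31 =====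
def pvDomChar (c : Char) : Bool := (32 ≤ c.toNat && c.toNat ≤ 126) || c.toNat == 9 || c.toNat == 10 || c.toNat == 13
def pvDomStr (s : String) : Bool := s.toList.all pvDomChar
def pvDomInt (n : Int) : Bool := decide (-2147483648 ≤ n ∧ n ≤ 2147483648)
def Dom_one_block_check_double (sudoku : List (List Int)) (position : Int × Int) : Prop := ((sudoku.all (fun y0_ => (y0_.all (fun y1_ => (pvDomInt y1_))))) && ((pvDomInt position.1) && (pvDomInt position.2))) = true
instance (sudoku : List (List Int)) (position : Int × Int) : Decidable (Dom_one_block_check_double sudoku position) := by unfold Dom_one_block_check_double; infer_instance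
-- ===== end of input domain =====

-- B replaces A's collect-all-cells-then-compare-len(set)-vs-len check by a set-free brute-force
-- all-pairs comparison over linearized block indices 0..8 (row k//3, col k%3), early False at the
-- first equal pair (objective: alternative, not faster).

-- ===== PORT A =====
def one_block_check_double (sudoku : List (List Int)) (position : Int × Int) : Bool :=
  let f_idx := position.1
  let s_idx := position.2
  -- nested loops appending sudoku[first][second]; pyGetD is exact under Pre_ (all indices in range)
  let one_block :=
    (PySem.List.pyRange f_idx (f_idx + 3) 1).foldl (fun acc first =>
      (PySem.List.pyRange s_idx (s_idx + 3) 1).foldl (fun acc second =>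
        acc ++ [PySem.List.pyGetD (PySem.List.pyGetD sudoku first []) second 0]) acc) []
  let block_len : Int := one_block.length
  let nodouble_len : Int := (PySem.Set.ofList one_block).length
  -- A's 'if … elif …': the elif condition is the exact negation, so else = the elif branch
  if block_len = nodouble_len then true
  else false

-- ===== PORT B =====
-- Source B's cell read: sudoku[f_idx + k // 3][s_idx + k % 3]
def pvCellB (sudoku : List (List Int)) (f_idx s_idx k : Int) : Int :=
  PySem.List.pyGetD (PySem.List.pyGetD sudoku (f_idx + PySem.Int.floordiv k 3) [])
    (s_idx + PySem.Int.mod k 3) 0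

-- inner loop of Source B: compare vk against cells l (l > k), 'return False' = false on a match
def pvInnerB (sudoku : List (List Int)) (f_idx s_idx vk : Int) : List Int → Bool
  | [] => true
  | l :: ls =>
    if vk = pvCellB sudoku f_idx s_idx l then false
    else pvInnerB sudoku f_idx s_idx vk ls

-- outer loop of Source B over the linear indices k
def pvOuterB (sudoku : List (List Int)) (f_idx s_idx : Int) : List Int → Bool
  | [] => true
  | k :: ks =>
    if pvInnerB sudoku f_idx s_idx (pvCellB sudoku f_idx s_idx k)
        (PySem.List.pyRange (k + 1) 9 1) then
      pvOuterB sudoku f_idx s_idx ks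
    else false

def one_block_check_double_alt (sudoku : List (List Int)) (position : Int × Int) : Bool :=
  pvOuterB sudoku position.1 position.2 (PySem.List.pyRange 0 9 1)

-- ===== PRECONDITION & SPEC =====
-- Pre_ excludes exactly the inputs where Python A raises IndexError: some accessed cell
-- sudoku[first][second] (first in [f,f+3), second in [s,s+3)) is out of range.
def Pre_one_block_check_double (sudoku : List (List Int)) (position : Int × Int) : Prop :=
  ∀ first ∈ PySem.List.pyRange position.1 (position.1 + 3) 1,
    PySem.Raise.InRange sudoku.length first ∧
    ∀ second ∈ PySem.List.pyRange position.2 (position.2 + 3) 1,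
      PySem.Raise.InRange (PySem.List.pyGetD sudoku first []).length second

instance (sudoku : List (List Int)) (position : Int × Int) : Decidable (Pre_one_block_check_double sudoku position) := by
  unfold Pre_one_block_check_double; infer_instance

def pvWitness_one_block_check_double : List (List Int) × (Int × Int) :=
  ([[1, 2, 3], [4, 5, 6], [7, 8, 9]], (0, 0))

def Spec_one_block_check_double (sudoku : List (List Int)) (position : Int × Int) (out : Bool) : Prop := out = one_block_check_double_alt sudoku position
instance (sudoku : List (List Int)) (position : Int × Int) (out : Bool) : Decidable (Spec_one_block_check_double sudoku position out) := by unfold Spec_one_block_check_double; infer_instance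

-- ===== CLAIM (what is proved, stated in full; the proofs are below) =====
def Claim_equal_one_block_check_double : Prop := ∀ (sudoku : List (List Int)) (position : Int × Int), Dom_one_block_check_double sudoku position → Pre_one_block_check_double sudoku position → Spec_one_block_check_double sudoku position (one_block_check_double sudoku position)

-- ===== LEMMAS AND PROOFS =====

-- A's length test is exactly Nodup of the collected list
theorem length_ofList_eq_iff_nodup (xs : List Int) :
    (PySem.Set.ofList xs).length = xs.length ↔ xs.Nodup := by
  induction xs with
  | nil => simp
  | cons x xs ih =>
    rw [PySem.Set.ofList_cons]
    by_cases hx : x ∈ xs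
    · have hmem : x ∈ PySem.Set.ofList xs := (PySem.Set.mem_ofList xs x).2 hx
      have hlt : (PySem.Set.discard (PySem.Set.ofList xs) x).length < (PySem.Set.ofList xs).length := by
        simp only [PySem.Set.discard]
        exact List.length_filter_lt_length_iff_exists.2 ⟨x, hmem, by simp⟩
      have hle := PySem.Set.length_ofList_le (xs := xs)
      simp only [List.length_cons, List.nodup_cons]
      constructor
      · intro h; exact absurd h (by omega)
      · rintro ⟨hxn, _⟩; exact absurd hx hxn
    · have hd : PySem.Set.discard (PySem.Set.ofList xs) x = PySem.Set.ofList xs := by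
        simp only [PySem.Set.discard]
        apply List.filter_eq_self.2
        intro a ha
        have ham : a ∈ xs := (PySem.Set.mem_ofList xs a).1 ha
        have hne : a ≠ x := fun h => hx (h ▸ ham)
        simp [hne]
      rw [hd, List.length_cons, List.length_cons, List.nodup_cons]
      constructor
      · intro h; exact ⟨hx, ih.1 (by omega)⟩
      · rintro ⟨-, hnd⟩; rw [ih.2 hnd]

-- A's nested collecting loops build the flatMap of the cell values
theorem pvBlock_eq_flatMap (sudoku : List (List Int)) (position : Int × Int) :
    (PySem.List.pyRange position.1 (position.1 + 3) 1).foldl (fun acc first =>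
        (PySem.List.pyRange position.2 (position.2 + 3) 1).foldl (fun acc second =>
          acc ++ [PySem.List.pyGetD (PySem.List.pyGetD sudoku first []) second 0]) acc) [] =
      (PySem.List.pyRange position.1 (position.1 + 3) 1).flatMap (fun i =>
        (PySem.List.pyRange position.2 (position.2 + 3) 1).map
          (fun j => PySem.List.pyGetD (PySem.List.pyGetD sudoku i []) j 0)) := by
  have h1 : (PySem.List.pyRange position.1 (position.1 + 3) 1).foldl (fun acc first =>
        (PySem.List.pyRange position.2 (position.2 + 3) 1).foldl (fun acc second =>
          acc ++ [PySem.List.pyGetD (PySem.List.pyGetD sudoku first []) second 0]) acc) [] =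
      (PySem.List.pyRange position.1 (position.1 + 3) 1).foldl (fun acc first =>
        acc ++ (PySem.List.pyRange position.2 (position.2 + 3) 1).map
          (fun j => PySem.List.pyGetD (PySem.List.pyGetD sudoku first []) j 0)) [] := by
    apply PySem.List.foldl_congr_mem
    intro acc x _
    rw [PySem.List.foldl_append_singleton_eq_map]
  rw [h1, PySem.List.foldl_append_eq_flatMap, List.nil_append]

-- A computes Nodup of the flattened cell list
theorem one_block_check_double_eq_nodup (sudoku : List (List Int)) (position : Int × Int) :
    one_block_check_double sudoku position =
      decide ((PySem.List.pyRange position.1 (position.1 + 3) 1).flatMap (fun i =>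
        (PySem.List.pyRange position.2 (position.2 + 3) 1).map
          (fun j => PySem.List.pyGetD (PySem.List.pyGetD sudoku i []) j 0)) |>.Nodup) := by
  unfold one_block_check_double
  dsimp only
  rw [pvBlock_eq_flatMap]
  set cells := (PySem.List.pyRange position.1 (position.1 + 3) 1).flatMap (fun i =>
        (PySem.List.pyRange position.2 (position.2 + 3) 1).map
          (fun j => PySem.List.pyGetD (PySem.List.pyGetD sudoku i []) j 0)) with hc
  by_cases hnd : cells.Nodup
  · rw [if_pos (by exact_mod_cast ((length_ofList_eq_iff_nodup cells).2 hnd).symm)]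
    simp [hnd]
  · rw [if_neg (fun h => hnd ((length_ofList_eq_iff_nodup cells).1 (by exact_mod_cast h.symm)))]
    simp [hnd]

-- B's inner loop decides 'vk differs from every later cell'
theorem pvInnerB_eq (sudoku : List (List Int)) (f_idx s_idx vk : Int) (js : List Int) :
    pvInnerB sudoku f_idx s_idx vk js =
      decide (∀ j ∈ js, vk ≠ pvCellB sudoku f_idx s_idx j) := by
  induction js with
  | nil => simp [pvInnerB]
  | cons j js ih =>
    simp only [pvInnerB, ih]
    by_cases h : vk = pvCellB sudoku f_idx s_idx j
    · rw [if_pos h]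
      symm; rw [decide_eq_false_iff_not]
      intro hall
      exact hall j List.mem_cons_self h
    · rw [if_neg h]
      apply decide_eq_decide.mpr
      constructor
      · intro hall x hx
        rcases List.mem_cons.1 hx with rfl | hx'
        · exact h
        · exact hall x hx'
      · intro hall x hx
        exact hall x (List.mem_cons.2 (Or.inr hx))

-- B's outer loop on a suffix range [c,9) decides pairwise distinctness of the mapped cells
theorem pvOuterB_eq (sudoku : List (List Int)) (f_idx s_idx : Int) :
    ∀ (n : Nat) (c : Int), (9 - c).toNat = n →
      pvOuterB sudoku f_idx s_idx (PySem.List.pyRange c 9 1) =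
        decide (((PySem.List.pyRange c 9 1).map (pvCellB sudoku f_idx s_idx)).Pairwise (· ≠ ·)) := by
  intro n
  induction n with
  | zero =>
    intro c hc
    rw [PySem.List.pyRange_one_eq_nil (by omega)]
    simp [pvOuterB]
  | succ n ih =>
    intro c hc
    rw [PySem.List.pyRange_one_cons (by omega)]
    simp only [pvOuterB, List.map_cons, List.pairwise_cons, pvInnerB_eq,
      ih (c + 1) (by omega)]
    by_cases h : ∀ j ∈ PySem.List.pyRange (c + 1) 9 1,
        pvCellB sudoku f_idx s_idx c ≠ pvCellB sudoku f_idx s_idx j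
    · rw [if_pos (by simpa using h)]
      apply decide_eq_decide.mpr
      constructor
      · intro hp
        refine ⟨?_, hp⟩
        intro x hx
        rcases List.mem_map.1 hx with ⟨j, hj, rfl⟩
        exact h j hj
      · rintro ⟨-, hp⟩; exact hp
    · rw [if_neg (by simpa using h)]
      symm; rw [decide_eq_false_iff_not]
      rintro ⟨hall, -⟩
      exact h (fun j hj => hall _ (List.mem_map.2 ⟨j, hj, rfl⟩))

-- the 3-element range, explicitly
theorem pvRange3 (a : Int) : PySem.List.pyRange a (a + 3) 1 = [a, a + 1, a + 2] := by
  rw [PySem.List.pyRange_one_cons (by omega), PySem.List.pyRange_one_cons (by omega),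
    PySem.List.pyRange_one_cons (by omega), PySem.List.pyRange_one_eq_nil (by omega)]
  norm_num
  omega

-- B's linearized cell list coincides with A's flattened cell list
theorem pvCells_eq (sudoku : List (List Int)) (f_idx s_idx : Int) :
    (PySem.List.pyRange 0 9 1).map (pvCellB sudoku f_idx s_idx) =
      (PySem.List.pyRange f_idx (f_idx + 3) 1).flatMap (fun i =>
        (PySem.List.pyRange s_idx (s_idx + 3) 1).map
          (fun j => PySem.List.pyGetD (PySem.List.pyGetD sudoku i []) j 0)) := by
  have hr : PySem.List.pyRange 0 9 1 = [0, 1, 2, 3, 4, 5, 6, 7, 8] := by decide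
  rw [hr, pvRange3, pvRange3]
  simp only [List.map_cons, List.map_nil, List.flatMap_cons, List.flatMap_nil,
    List.cons_append, List.nil_append, pvCellB]
  norm_num [show PySem.Int.floordiv 0 3 = 0 from by decide,
    show PySem.Int.floordiv 1 3 = 0 from by decide,
    show PySem.Int.floordiv 2 3 = 0 from by decide,
    show PySem.Int.floordiv 3 3 = 1 from by decide,
    show PySem.Int.floordiv 4 3 = 1 from by decide,
    show PySem.Int.floordiv 5 3 = 1 from by decide,
    show PySem.Int.floordiv 6 3 = 2 from by decide,
    show PySem.Int.floordiv 7 3 = 2 from by decide,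
    show PySem.Int.floordiv 8 3 = 2 from by decide,
    show PySem.Int.mod 0 3 = 0 from by decide,
    show PySem.Int.mod 1 3 = 1 from by decide,
    show PySem.Int.mod 2 3 = 2 from by decide,
    show PySem.Int.mod 3 3 = 0 from by decide,
    show PySem.Int.mod 4 3 = 1 from by decide,
    show PySem.Int.mod 5 3 = 2 from by decide,
    show PySem.Int.mod 6 3 = 0 from by decide,
    show PySem.Int.mod 7 3 = 1 from by decide,
    show PySem.Int.mod 8 3 = 2 from by decide]

-- ===== VERDICT (by name: the statement is the Claim_ definition above) =====
theorem one_block_check_double_spec : Claim_equal_one_block_check_double := by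
  intro sudoku position _hdom _hpre
  unfold Spec_one_block_check_double one_block_check_double_alt
  rw [one_block_check_double_eq_nodup,
    pvOuterB_eq sudoku position.1 position.2 9 0 (by decide),
    pvCells_eq]
  rfl
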